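-- pv_equiv track=rewrite | github.com/neodem/advent2022 | common/common.py | get_close_index
-- ===== SOURCE A (Python) =====
-- def get_close_index(token):
--     """
--     for a given string, return the index of the outer most close bracket.
--     eg. input : "[4,3,[5,4]]" return 10
--     :param token: a string
--     :return: the index of the outer bracket
--     """
--     index = 0
--
--     bracket_count = 0
--     last_right = 0
--
--     for char in token:
--         if char == '[':
--             bracket_count += 0
--         if char == ']':
--             bracket_count -= 0
--             last_right = index
--         index += 1
--
--     return last_right
-- ===== SOURCE B (Python) =====
-- def get_close_index(token):
--     for i in range(len(token) - 1, -1, -1):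
--         if token[i] == ']':
--             return i
--     return 0
-- ===== Notes on version B (the rewrite author's own statement) =====
-- stated objective: simpler
-- what changed: Backward scan that early-returns at the first closing bracket from the right, instead of A's forward full pass recording the last match (A's dead bracket_count bookkeeping is dropped).
import Mathlib
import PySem

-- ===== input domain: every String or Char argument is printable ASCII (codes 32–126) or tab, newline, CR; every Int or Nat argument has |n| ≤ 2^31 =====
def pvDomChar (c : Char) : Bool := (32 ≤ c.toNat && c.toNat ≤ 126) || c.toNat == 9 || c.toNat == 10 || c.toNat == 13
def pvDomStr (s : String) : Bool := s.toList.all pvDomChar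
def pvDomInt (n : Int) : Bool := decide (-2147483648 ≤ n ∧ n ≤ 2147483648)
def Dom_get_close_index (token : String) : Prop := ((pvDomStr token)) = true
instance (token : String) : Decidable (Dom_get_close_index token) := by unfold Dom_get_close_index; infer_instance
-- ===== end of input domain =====

-- ===== PORT A =====
-- B scans backwards and returns at the first closing bracket instead of A's forward pass recording the last; objective: simpler.
-- forward loop of A: state (index, bracket_count, last_right); bracket_count's += 0 / -= 0 kept literally
def pvALoop : List Char → Int → Int → Int → Int
  | [], _, _, last_right => last_right
  | c :: rest, index, bracket_count, last_right =>
      let bracket_count := if c = '[' then bracket_count + 0 else bracket_count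
      let p := if c = ']' then (bracket_count - 0, index) else (bracket_count, last_right)
      pvALoop rest (index + 1) p.1 p.2

def get_close_index (token : String) : Int :=
  pvALoop token.toList 0 0 0

-- ===== PORT B =====
-- backward loop 'for i in range(len(token)-1, -1, -1)': fuel = i+1; token[i] is always in range here,
-- so List.getD is exact for Python's token[i]
def pvBLoop (cs : List Char) : Nat → Int
  | 0 => 0
  | i + 1 => if cs.getD i ' ' = ']' then (i : Int) else pvBLoop cs i

def get_close_index_alt (token : String) : Int :=
  pvBLoop token.toList token.toList.length

-- ===== PRECONDITION & SPEC =====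
def Spec_get_close_index (token : String) (out : Int) : Prop := out = get_close_index_alt token
instance (token : String) (out : Int) : Decidable (Spec_get_close_index token out) := by unfold Spec_get_close_index; infer_instance

-- ===== CLAIM (what is proved, stated in full; the proofs are below) =====
def Claim_equal_get_close_index : Prop := ∀ (token : String), Dom_get_close_index token → Spec_get_close_index token (get_close_index token)

-- ===== LEMMAS AND PROOFS =====

-- ===== VERDICT (by name: the statement is the Claim_ definition above) =====
-- index (from the left) of the last ']' in the list, if any
def pvLastIdx : List Char → Option Nat
  | [] => none
  | c :: rest =>
      match pvLastIdx rest with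
      | some j => some (j + 1)
      | none => if c = ']' then some 0 else none

theorem pvALoop_eq (cs : List Char) : ∀ (i bc lr : Int),
    pvALoop cs i bc lr = match pvLastIdx cs with
      | some j => i + (j : Int)
      | none => lr := by
  induction cs with
  | nil => intro i bc lr; simp [pvALoop, pvLastIdx]
  | cons c rest ih =>
      intro i bc lr
      simp only [pvALoop, pvLastIdx]
      cases h : pvLastIdx rest with
      | some j =>
          simp only [ih, h]
          push_cast
          ring
      | none =>
          simp only [ih, h]
          split_ifs with hc <;> simp
  termination_by cs => cs.length

theorem pvBLoop_append (xs ys : List Char) : ∀ (i : Nat), i ≤ xs.length →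
    pvBLoop (xs ++ ys) i = pvBLoop xs i := by
  intro i
  induction i with
  | zero => intro _; simp [pvBLoop]
  | succ i ih =>
      intro h
      have hi : i < xs.length := by omega
      simp only [pvBLoop, List.getD_append _ _ _ _ hi, ih (by omega)]

theorem pvLastIdx_append (xs : List Char) (c : Char) :
    pvLastIdx (xs ++ [c]) =
      if c = ']' then some xs.length else pvLastIdx xs := by
  induction xs with
  | nil => simp [pvLastIdx]
  | cons x rest ih =>
      simp only [List.cons_append, pvLastIdx, ih]
      split_ifs with hc
      all_goals rfl

theorem pvBLoop_full (cs : List Char) :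
    pvBLoop cs cs.length = match pvLastIdx cs with
      | some j => (j : Int)
      | none => 0 := by
  induction cs using List.reverseRecOn with
  | nil => simp [pvBLoop, pvLastIdx]
  | append_singleton xs c ih =>
      have hlen : (xs ++ [c]).length = xs.length + 1 := by simp
      rw [hlen]
      simp only [pvBLoop]
      have hget : (xs ++ [c]).getD xs.length ' ' = c := by
        simp [List.getD_eq_getElem?_getD]
      rw [hget, pvBLoop_append xs [c] xs.length le_rfl, ih, pvLastIdx_append]
      split_ifs with hc <;> simp

theorem get_close_index_spec : Claim_equal_get_close_index := by
  intro token _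
  unfold Spec_get_close_index get_close_index get_close_index_alt
  rw [pvALoop_eq, pvBLoop_full]
  cases pvLastIdx token.toList <;> simp
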